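-- pv_equiv track=rewrite | github.com/pmillerschmidt/Qtar | agent.py | _is_similar_motif
-- ===== SOURCE A (Python) =====
-- def _is_similar_motif(motif1, motif2):
--     """Check if motifs are too similar"""
--     if len(motif1) != len(motif2):
--         return False
--
--     notes1 = [n[0] for n in motif1]
--     notes2 = [n[0] for n in motif2]
--     intervals1 = [b - a for a, b in zip(notes1[:-1], notes1[1:])]
--     intervals2 = [b - a for a, b in zip(notes2[:-1], notes2[1:])]
--
--     return intervals1 == intervals2
-- ===== SOURCE B (Python) =====
-- def _is_similar_motif(motif1, motif2):
--     """Check if motifs are too similar"""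
--     if len(motif1) != len(motif2):
--         return False
--     if not motif1:
--         return True
--     d = motif2[0][0] - motif1[0][0]
--     for n1, n2 in zip(motif1, motif2):
--         if n2[0] - n1[0] != d:
--             return False
--     return True
-- ===== Notes on version B (the rewrite author's own statement) =====
-- stated objective: simpler
-- what changed: Instead of building and comparing two interval lists, B computes the head-pitch offset d once and makes a single early-exit pass over zip(motif1, motif2) checking each pitch difference equals d (identical intervals = uniform transposition).
import Mathlib
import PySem

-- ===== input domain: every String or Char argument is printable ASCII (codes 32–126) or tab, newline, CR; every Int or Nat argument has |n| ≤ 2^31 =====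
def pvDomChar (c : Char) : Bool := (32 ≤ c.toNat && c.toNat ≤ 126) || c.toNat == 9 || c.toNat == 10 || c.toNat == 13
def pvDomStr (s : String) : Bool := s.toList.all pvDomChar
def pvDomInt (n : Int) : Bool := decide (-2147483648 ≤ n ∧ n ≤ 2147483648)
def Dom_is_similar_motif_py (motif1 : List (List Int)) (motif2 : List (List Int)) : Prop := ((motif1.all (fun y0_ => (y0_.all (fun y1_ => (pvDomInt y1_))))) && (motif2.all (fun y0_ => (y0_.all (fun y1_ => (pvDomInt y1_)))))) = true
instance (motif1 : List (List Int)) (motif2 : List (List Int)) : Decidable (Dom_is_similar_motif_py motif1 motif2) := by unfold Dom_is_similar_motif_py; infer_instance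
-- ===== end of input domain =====

-- B replaces building and comparing two interval lists by a single early-exit pass
-- checking a constant pitch offset between paired notes (objective: simpler).


-- ===== PORT A =====
-- n[0]; exact when n ≠ [] (Pre_ excludes empty inner lists, where Python raises IndexError)
def pyHead0 (n : List Int) : Int := (PySem.List.pyGet? n 0).getD 0

def is_similar_motif_py (motif1 : List (List Int)) (motif2 : List (List Int)) : Bool :=
  if motif1.length ≠ motif2.length then false
  else
    let notes1 := motif1.map pyHead0
    let notes2 := motif2.map pyHead0
    let intervals1 := ((PySem.List.slice notes1 none (some (-1))).zip (PySem.List.slice notes1 (some 1) none)).map (fun p => p.2 - p.1)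
    let intervals2 := ((PySem.List.slice notes2 none (some (-1))).zip (PySem.List.slice notes2 (some 1) none)).map (fun p => p.2 - p.1)
    intervals1 == intervals2

-- ===== PORT B =====
def is_similar_motif_py_alt (motif1 : List (List Int)) (motif2 : List (List Int)) : Bool :=
  if motif1.length ≠ motif2.length then false
  else
    match motif1, motif2 with
    | [], _ => true
    | _, [] => true
    | m1h :: _, m2h :: _ =>
      let d := pyHead0 m2h - pyHead0 m1h
      (motif1.zip motif2).all (fun p => pyHead0 p.2 - pyHead0 p.1 == d)

-- ===== PRECONDITION & SPEC =====
-- Pre_ excludes exactly the inputs where Python A raises IndexError: equal-length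
-- motifs in which some inner list is empty (n[0] fails).
def Pre_is_similar_motif_py (motif1 : List (List Int)) (motif2 : List (List Int)) : Prop :=
  motif1.length = motif2.length → ((∀ l ∈ motif1, l ≠ []) ∧ (∀ l ∈ motif2, l ≠ []))
instance (motif1 : List (List Int)) (motif2 : List (List Int)) : Decidable (Pre_is_similar_motif_py motif1 motif2) := by unfold Pre_is_similar_motif_py; infer_instance
def pvWitness_is_similar_motif_py : List (List Int) × List (List Int) := ([[60, 1], [62, 1]], [[64, 2], [66, 5]])

def Spec_is_similar_motif_py (motif1 : List (List Int)) (motif2 : List (List Int)) (out : Bool) : Prop := out = is_similar_motif_py_alt motif1 motif2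
instance (motif1 : List (List Int)) (motif2 : List (List Int)) (out : Bool) : Decidable (Spec_is_similar_motif_py motif1 motif2 out) := by unfold Spec_is_similar_motif_py; infer_instance

-- ===== CLAIM (what is proved, stated in full; the proofs are below) =====
def Claim_equal_is_similar_motif_py : Prop := ∀ (motif1 : List (List Int)) (motif2 : List (List Int)), Dom_is_similar_motif_py motif1 motif2 → Pre_is_similar_motif_py motif1 motif2 → Spec_is_similar_motif_py motif1 motif2 (is_similar_motif_py motif1 motif2)

-- ===== LEMMAS AND PROOFS =====

-- structural interval list of a pitch list
def ivs : List Int → List Int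
  | a :: x :: t => (x - a) :: ivs (x :: t)
  | _ => []

theorem ivs_eq (l : List Int) :
    (l.dropLast.zip l.tail).map (fun p : Int × Int => p.2 - p.1) = ivs l := by
  induction l with
  | nil => simp [ivs]
  | cons a t ih =>
    cases t with
    | nil => simp [ivs]
    | cons x t' =>
      simp only [ivs, List.dropLast_cons₂, List.tail_cons, List.zip_cons_cons, List.map_cons]
      exact congrArg _ ih

theorem ivs_iff (a b : Int) (xs ys : List Int) (h : xs.length = ys.length) :
    ivs (a :: xs) = ivs (b :: ys) ↔ ∀ p ∈ xs.zip ys, p.2 - p.1 = b - a := by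
  induction xs generalizing ys a b with
  | nil =>
    cases ys with
    | nil => simp [ivs]
    | cons y t => simp at h
  | cons x xs' ih =>
    cases ys with
    | nil => simp at h
    | cons y ys' =>
      simp only [List.length_cons, Nat.add_right_cancel_iff] at h
      have := ih x y ys' h
      constructor
      · intro he
        simp only [ivs, List.cons.injEq] at he
        obtain ⟨h1, h2⟩ := he
        intro p hp
        simp only [List.zip_cons_cons, List.mem_cons] at hp
        rcases hp with rfl | hp
        · omega
        · have := (this.mp h2) p hp; omega
      · intro hall
        have hxy : y - x = b - a := hall (x, y) (by simp)
        simp only [ivs, List.cons.injEq]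
        refine ⟨by omega, this.mpr ?_⟩
        intro p hp
        have := hall p (by simp [hp]); omega

theorem is_similar_motif_py_eq (motif1 motif2 : List (List Int)) :
    is_similar_motif_py motif1 motif2 = is_similar_motif_py_alt motif1 motif2 := by
  unfold is_similar_motif_py is_similar_motif_py_alt
  by_cases hl : motif1.length = motif2.length
  · simp only [hl, ne_eq, not_true_eq_false, if_false]
    cases motif1 with
    | nil =>
      cases motif2 with
      | nil => simp [PySem.List.slice_to_neg_one, PySem.List.slice_from_one]
      | cons h t => simp at hl
    | cons h1 t1 =>
      cases motif2 with
      | nil => simp at hl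
      | cons h2 t2 =>
        simp only [List.length_cons, Nat.add_right_cancel_iff] at hl
        simp only [PySem.List.slice_to_neg_one, PySem.List.slice_from_one, ivs_eq,
          List.map_cons, List.zip_cons_cons, List.all_cons]
        have hlen : (t1.map pyHead0).length = (t2.map pyHead0).length := by
          simp [hl]
        rw [show (pyHead0 h2 - pyHead0 h1 == pyHead0 h2 - pyHead0 h1) = true by simp,
          Bool.true_and]
        have hiff := ivs_iff (pyHead0 h1) (pyHead0 h2) (t1.map pyHead0) (t2.map pyHead0) hlen
        rw [Bool.eq_iff_iff]
        simp only [beq_iff_eq, List.all_eq_true]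
        rw [hiff, List.zip_map]
        constructor
        · intro hall p hp
          simpa using hall (Prod.map pyHead0 pyHead0 p) (List.mem_map_of_mem hp)
        · intro hall p hp
          obtain ⟨q, hq, rfl⟩ := List.mem_map.mp hp
          simpa using hall q hq
  · simp [hl]

-- ===== VERDICT (by name: the statement is the Claim_ definition above) =====
theorem is_similar_motif_py_spec : Claim_equal_is_similar_motif_py := by
  intro motif1 motif2 _ _
  exact is_similar_motif_py_eq motif1 motif2
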